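-- pv_equiv track=rewrite | github.com/Listera0/TransCompiler_for_beginner | [9] 기타/1차 요구기능 목표 코드/CS.py | FindNextWord
-- ===== SOURCE A (Python) =====
-- WordEndList = [" ", "=", ";", "(", ")", "{", "}", "[", "]", "\n", "\r"]
--
-- def FindNextWord( code ):
--     word = None
--     startindex = 0
--     startword = False
--
--     for i in range(0, len(code)):
--         if startword == False and code[i] not in WordEndList:
--             startindex = i
--             startword = True
--
--         if startword and code[i] in WordEndList:
--             word = code[startindex : i]
--             return word
--
--     return word
-- ===== SOURCE B (Python) =====
-- WordEndList = [" ", "=", ";", "(", ")", "{", "}", "[", "]", "\n", "\r"]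
--
-- def FindNextWord(code):
--     # Normalise every delimiter to a single separator, split on it, and return the
--     # first nonempty segment -- unless it is the last segment, i.e. the word was
--     # never terminated by a delimiter, in which case the result is None.
--     unified = "".join(" " if ch in WordEndList else ch for ch in code)
--     tokens = unified.split(" ")
--     for k, tok in enumerate(tokens):
--         if tok:
--             return tok if k < len(tokens) - 1 else None
--     return None
-- ===== Notes on version B (the rewrite author's own statement) =====
-- stated objective: alternative
-- what changed: Replaces A's single stateful index loop (startword flag, startindex, early-return slice) by a split-based algorithm: map every delimiter character to one separator, split the string on it, and return the first nonempty segment unless it is the last one (i.e. the word was never terminated).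
import Mathlib
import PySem

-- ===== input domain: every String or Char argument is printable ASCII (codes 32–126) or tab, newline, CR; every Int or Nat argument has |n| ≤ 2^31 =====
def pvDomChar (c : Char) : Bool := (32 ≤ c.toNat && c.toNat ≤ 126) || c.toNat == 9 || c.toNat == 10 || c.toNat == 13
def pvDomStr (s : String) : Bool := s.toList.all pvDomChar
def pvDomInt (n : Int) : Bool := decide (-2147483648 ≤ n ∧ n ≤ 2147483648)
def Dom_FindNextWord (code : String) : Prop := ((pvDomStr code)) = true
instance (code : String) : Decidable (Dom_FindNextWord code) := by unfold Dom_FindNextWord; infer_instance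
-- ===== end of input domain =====

-- B replaces A's stateful index loop (startword flag + slice) by a split-based
-- algorithm: map every delimiter to one separator, split on it, and return the first
-- nonempty segment unless it is the last one; objective: simpler/alternative.

def pvWEL : List Char := [' ', '=', ';', '(', ')', '{', '}', '[', ']', '\n', '\r']

-- ===== PORT A =====
-- A's for-loop over range(0, len(code)) with state (startindex, startword) and early return.
def pvGoA (cs : List Char) (i startindex : Nat) (startword : Bool) : Option String :=
  if h : i < cs.length then
    let c := cs[i]
    let p : Nat × Bool :=
      if startword = false ∧ c ∉ pvWEL then (i, true) else (startindex, startword)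
    if p.2 = true ∧ c ∈ pvWEL then
      some (String.ofList (PySem.List.slice cs (some (p.1 : Int)) (some (i : Int))))
    else pvGoA cs (i+1) p.1 p.2
  else none
termination_by cs.length - i

def FindNextWord (code : String) : Option String :=
  pvGoA code.toList 0 0 false

-- ===== PORT B =====
-- Source B's final for-loop over tokens: first nonempty token, None if it is the last one.
def pvPick : List (List Char) → Option String
  | [] => none
  | t :: rest =>
    if t ≠ [] then (if rest ≠ [] then some (String.ofList t) else none)
    else pvPick rest

def FindNextWord_alt (code : String) : Option String :=
  -- unified = "".join(" " if ch in WordEndList else ch for ch in code)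
  -- tokens  = unified.split(" ")
  pvPick (PySem.Chars.splitOn
    (code.toList.map (fun ch => if ch ∈ pvWEL then ' ' else ch)) [' '])

-- ===== PRECONDITION & SPEC =====
def Spec_FindNextWord (code : String) (out : Option String) : Prop := out = FindNextWord_alt code
instance (code : String) (out : Option String) : Decidable (Spec_FindNextWord code out) := by unfold Spec_FindNextWord; infer_instance

-- ===== CLAIM (what is proved, stated in full; the proofs are below) =====
def Claim_equal_FindNextWord : Prop := ∀ (code : String), Dom_FindNextWord code → Spec_FindNextWord code (FindNextWord code)

-- ===== LEMMAS AND PROOFS =====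

-- Pure structural form of split-on-one-separator (proof-side only).
def pvSplitSp : List Char → List (List Char)
  | [] => [[]]
  | c :: rest =>
    if c = ' ' then [] :: pvSplitSp rest
    else
      match pvSplitSp rest with
      | t :: ts => (c :: t) :: ts
      | [] => [[c]]

theorem pvSplitSp_ne_nil (l : List Char) : pvSplitSp l ≠ [] := by
  cases l with
  | nil => simp [pvSplitSp]
  | cons c rest =>
    unfold pvSplitSp
    by_cases h : c = ' '
    · simp [h]
    · simp only [h, if_false]
      cases pvSplitSp rest <;> simp

-- PySem's fueled splitter with a one-char separator is pvSplitSp.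
theorem pvGo_eq (l : List Char) : ∀ (fuel : Nat) (cur : List Char) (acc : List (List Char)),
    l.length ≤ fuel →
    PySem.Chars.splitOn.go [' '] (fuel + 1) l cur acc =
      acc.reverse ++ (match pvSplitSp l with
        | t :: ts => (cur.reverse ++ t) :: ts
        | [] => []) := by
  induction l with
  | nil =>
    intro fuel cur acc _
    simp [PySem.Chars.splitOn.go, pvSplitSp]
  | cons c rest ih =>
    intro fuel cur acc hf
    obtain ⟨fuel', rfl⟩ : ∃ k, fuel = k + 1 := ⟨fuel - 1, by simp at hf; omega⟩
    rw [PySem.Chars.splitOn.go]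
    by_cases h : c = ' '
    · have hpre : [' '].isPrefixOf (c :: rest) = true := by simp [List.isPrefixOf, h]
      rw [if_pos hpre]
      have := ih fuel' [] (cur.reverse :: acc) (by simp at hf; omega)
      simp only [List.drop_one, List.tail_cons, List.length_singleton]
      rw [this]
      obtain ⟨t, ts, hts⟩ : ∃ t ts, pvSplitSp rest = t :: ts := by
        cases hh : pvSplitSp rest with
        | nil => exact absurd hh (pvSplitSp_ne_nil rest)
        | cons t ts => exact ⟨t, ts, rfl⟩
      simp [pvSplitSp, h, hts]
    · have hpre : [' '].isPrefixOf (c :: rest) = false := by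
        simp [List.isPrefixOf]; exact fun hc => absurd hc.symm h
      rw [if_neg (by simp [hpre])]
      have := ih fuel' (c :: cur) acc (by simp at hf; omega)
      rw [this]
      obtain ⟨t, ts, hts⟩ : ∃ t ts, pvSplitSp rest = t :: ts := by
        cases hh : pvSplitSp rest with
        | nil => exact absurd hh (pvSplitSp_ne_nil rest)
        | cons t ts => exact ⟨t, ts, rfl⟩
      simp [pvSplitSp, h, hts]

theorem pvSplitOn_eq (l : List Char) : PySem.Chars.splitOn l [' '] = pvSplitSp l := by
  show PySem.Chars.splitOn.go [' '] (l.length + 1) l [] [] = pvSplitSp l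
  rw [pvGo_eq l l.length [] [] (le_refl _)]
  obtain ⟨t, ts, hts⟩ : ∃ t ts, pvSplitSp l = t :: ts := by
    cases hh : pvSplitSp l with
    | nil => exact absurd hh (pvSplitSp_ne_nil l)
    | cons t ts => exact ⟨t, ts, rfl⟩
  simp [hts]

-- Structural skip/take characterisation of A's loop (proof-side only).
def pvTakeSp : List Char → List Char → Option String
  | [], _ => none
  | c :: rest, acc => if c ∈ pvWEL then some (String.ofList acc) else pvTakeSp rest (acc ++ [c])

def pvSkipSp : List Char → Option String
  | [] => none
  | c :: rest => if c ∈ pvWEL then pvSkipSp rest else pvTakeSp rest [c]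

-- the delimiter-mapping of Source B
def pvF (ch : Char) : Char := if ch ∈ pvWEL then ' ' else ch

theorem pvF_eq_space_iff (ch : Char) : pvF ch = ' ' ↔ ch ∈ pvWEL := by
  unfold pvF
  by_cases h : ch ∈ pvWEL
  · simp [h]
  · simp only [h, if_false, iff_false]
    intro hc
    exact h (hc ▸ (by decide : (' ' : Char) ∈ pvWEL))

-- take-phase vs split: the accumulated prefix is prepended to the first token.
theorem pvTakeSp_eq (cs : List Char) : ∀ (acc : List Char),
    pvTakeSp cs acc =
      (match pvSplitSp (cs.map pvF) with
        | t :: ts => if ts = [] then none else some (String.ofList (acc ++ t))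
        | [] => none) := by
  induction cs with
  | nil => intro acc; simp [pvTakeSp, pvSplitSp]
  | cons c rest ih =>
    intro acc
    by_cases h : c ∈ pvWEL
    · have hsp : pvF c = ' ' := (pvF_eq_space_iff c).mpr h
      obtain ⟨t, ts, hts⟩ : ∃ t ts, pvSplitSp (rest.map pvF) = t :: ts := by
        cases hh : pvSplitSp (rest.map pvF) with
        | nil => exact absurd hh (pvSplitSp_ne_nil _)
        | cons t ts => exact ⟨t, ts, rfl⟩
      simp [pvTakeSp, h, pvSplitSp, hsp, hts]
    · have hce : c ≠ ' ' := fun e => h (e ▸ (by decide : (' ' : Char) ∈ pvWEL))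
      have hfc : pvF c = c := by simp [pvF, h]
      obtain ⟨t, ts, hts⟩ : ∃ t ts, pvSplitSp (rest.map pvF) = t :: ts := by
        cases hh : pvSplitSp (rest.map pvF) with
        | nil => exact absurd hh (pvSplitSp_ne_nil _)
        | cons t ts => exact ⟨t, ts, rfl⟩
      rw [show pvTakeSp (c :: rest) acc = pvTakeSp rest (acc ++ [c]) by simp [pvTakeSp, h]]
      rw [ih (acc ++ [c])]
      simp [pvSplitSp, hce, hfc, hts]

-- skip-phase vs split: A's whole loop is "first nonempty token unless last".
theorem pvSkipSp_eq (cs : List Char) : pvSkipSp cs = pvPick (pvSplitSp (cs.map pvF)) := by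
  induction cs with
  | nil => simp [pvSkipSp, pvSplitSp, pvPick]
  | cons c rest ih =>
    by_cases h : c ∈ pvWEL
    · have hsp : pvF c = ' ' := (pvF_eq_space_iff c).mpr h
      simp [pvSkipSp, h, pvSplitSp, hsp, pvPick, ih]
    · have hce : c ≠ ' ' := fun e => h (e ▸ (by decide : (' ' : Char) ∈ pvWEL))
      have hfc : pvF c = c := by simp [pvF, h]
      obtain ⟨t, ts, hts⟩ : ∃ t ts, pvSplitSp (rest.map pvF) = t :: ts := by
        cases hh : pvSplitSp (rest.map pvF) with
        | nil => exact absurd hh (pvSplitSp_ne_nil _)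
        | cons t ts => exact ⟨t, ts, rfl⟩
      rw [show pvSkipSp (c :: rest) = pvTakeSp rest [c] by simp [pvSkipSp, h]]
      rw [pvTakeSp_eq rest [c]]
      simp only [List.map_cons, pvSplitSp, hfc, hts]
      cases ts with
      | nil => simp [pvPick, hce]
      | cons t' ts' => simp [pvPick, hce]

-- A's loop after the word has started is the take phase on the remaining suffix.
theorem pvGoA_true (n : Nat) : ∀ (cs : List Char) (i si : Nat), cs.length - i ≤ n → si ≤ i →
    pvGoA cs i si true = pvTakeSp (cs.drop i) ((cs.drop si).take (i - si)) := by
  induction n with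
  | zero =>
    intro cs i si hn _
    rw [pvGoA]
    have h : ¬ i < cs.length := by omega
    have : cs.drop i = [] := by simp [List.drop_eq_nil_iff]; omega
    simp [h, this, pvTakeSp]
  | succ n ih =>
    intro cs i si hn hsi
    rw [pvGoA]
    by_cases h : i < cs.length
    · have hdrop : cs.drop i = cs[i] :: cs.drop (i+1) := List.drop_eq_getElem_cons h
      by_cases hc : cs[i] ∈ pvWEL
      · simp only [h, dif_pos, hc, hdrop]
        simp [pvTakeSp, hc, PySem.List.slice_natCast]
      · have hext : (cs.drop si).take (i - si) ++ [cs[i]] = (cs.drop si).take (i + 1 - si) := by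
          have hlen : i - si < (cs.drop si).length := by simp [List.length_drop]; omega
          rw [show i + 1 - si = (i - si) + 1 by omega, List.take_add_one]
          simp [List.getElem?_eq_getElem hlen, List.getElem_drop,
                show si + (i - si) = i by omega]
        simp only [h, dif_pos, hc]
        simp only [not_false_iff, and_true]
        rw [if_neg (by simp)]
        rw [if_neg (show ¬ (true = false) by simp)]
        show pvGoA cs (i+1) si true = _
        rw [ih cs (i+1) si (by omega) (by omega)]
        rw [hdrop]
        simp [pvTakeSp, hc, hext]
    · have : cs.drop i = [] := by simp [List.drop_eq_nil_iff]; omega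
      simp [h, this, pvTakeSp]

-- A's loop before the word has started is the skip phase on the remaining suffix.
theorem pvGoA_false (n : Nat) : ∀ (cs : List Char) (i si : Nat), cs.length - i ≤ n →
    pvGoA cs i si false = pvSkipSp (cs.drop i) := by
  induction n with
  | zero =>
    intro cs i si hn
    rw [pvGoA]
    have h : ¬ i < cs.length := by omega
    have : cs.drop i = [] := by simp [List.drop_eq_nil_iff]; omega
    simp [h, this, pvSkipSp]
  | succ n ih =>
    intro cs i si hn
    rw [pvGoA]
    by_cases h : i < cs.length
    · have hdrop : cs.drop i = cs[i] :: cs.drop (i+1) := List.drop_eq_getElem_cons h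
      by_cases hc : cs[i] ∈ pvWEL
      · simp only [h, dif_pos, hc]
        rw [hdrop]
        simp only [pvSkipSp, if_pos hc]
        simp [ih cs (i+1) si (by omega)]
      · simp only [h, dif_pos, hc]
        rw [hdrop]
        simp only [pvSkipSp, if_neg hc]
        simp only [not_false_iff, and_true]
        rw [if_neg (by simp)]
        rw [if_pos trivial]
        show pvGoA cs (i+1) i true = _
        rw [pvGoA_true (cs.length - (i+1)) cs (i+1) i (by omega) (by omega)]
        rw [show i + 1 - i = 1 by omega]
        rw [show List.take 1 (List.drop i cs) = [cs[i]] from by rw [hdrop]; rfl]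
    · have : cs.drop i = [] := by simp [List.drop_eq_nil_iff]; omega
      simp [h, this, pvSkipSp]

-- ===== VERDICT (by name: the statement is the Claim_ definition above) =====
theorem FindNextWord_spec : Claim_equal_FindNextWord := by
  intro code _
  unfold Spec_FindNextWord FindNextWord FindNextWord_alt
  generalize code.toList = cs
  rw [pvGoA_false cs.length cs 0 0 (by omega), List.drop_zero, pvSkipSp_eq, pvSplitOn_eq]
  rfl
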